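-- pv_equiv track=rewrite | github.com/MerrydayPrject/final-repo-back | body_analysis_test/database.py | format_body_type_info_for_prompt
-- ===== SOURCE A (Python) =====
-- from typing import Optional, Dict, List
--
-- def format_body_type_info_for_prompt(definitions: List[Dict]) -> str:
--     """
--     체형별 정의 데이터를 Gemini 프롬프트에 포함할 형식으로 변환
--
--     Args:
--         definitions: get_multiple_body_definitions()의 반환값 (리스트)
--
--     Returns:
--         str: 프롬프트에 포함할 텍스트 (없으면 빈 문자열)
--     """
--     if not definitions:
--         return ""
--
--     parts = []
--
--     for definition in definitions:
--         body_feature = definition.get('body_feature', '')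
--
--         if definition.get('strengths'):
--             parts.append(f"**{body_feature}**: {definition['strengths']}")
--
--         if definition.get('style_tips'):
--             parts.append(f"  - 스타일 팁: {definition['style_tips']}")
--
--         if definition.get('recommended_dresses'):
--             parts.append(f"  - 추천 드레스: {definition['recommended_dresses']}")
--
--         if definition.get('avoid_dresses'):
--             parts.append(f"  - 피해야 할 드레스: {definition['avoid_dresses']}")
--
--         parts.append("")  # 빈 줄 추가
--
--     if parts:
--         return "\n\n**체형별 정의 정보**:\n" + "\n".join(parts) + "\n"
--     else:
--         return ""
-- ===== SOURCE B (Python) =====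
-- _FIELDS = [
--     ('style_tips', '  - 스타일 팁: '),
--     ('recommended_dresses', '  - 추천 드레스: '),
--     ('avoid_dresses', '  - 피해야 할 드레스: '),
-- ]
--
-- def _block(definition):
--     """Render one definition as a self-contained block ending in a blank line."""
--     texts = []
--     if definition.get('strengths'):
--         texts.append("**%s**: %s" % (definition.get('body_feature', ''), definition['strengths']))
--     texts.extend(prefix + definition[key] for key, prefix in _FIELDS if definition.get(key))
--     return "".join(t + "\n" for t in texts) + "\n"
--
-- def format_body_type_info_for_prompt(definitions):
--     def rec(ds):
--         return "" if not ds else _block(ds[0]) + rec(ds[1:])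
--     return "" if not definitions else "\n\n**체형별 정의 정보**:\n" + rec(definitions)
-- ===== Notes on version B (the rewrite author's own statement) =====
-- stated objective: alternative
-- what changed: Replaces A's imperative single pass that appends into one global parts list and finally '\n'.joins it by a recursive decomposition: a pure per-definition _block helper that renders each definition to a self-contained text block (joining each text with its own newline), with the blocks concatenated by structural recursion over the list.
import Mathlib
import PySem

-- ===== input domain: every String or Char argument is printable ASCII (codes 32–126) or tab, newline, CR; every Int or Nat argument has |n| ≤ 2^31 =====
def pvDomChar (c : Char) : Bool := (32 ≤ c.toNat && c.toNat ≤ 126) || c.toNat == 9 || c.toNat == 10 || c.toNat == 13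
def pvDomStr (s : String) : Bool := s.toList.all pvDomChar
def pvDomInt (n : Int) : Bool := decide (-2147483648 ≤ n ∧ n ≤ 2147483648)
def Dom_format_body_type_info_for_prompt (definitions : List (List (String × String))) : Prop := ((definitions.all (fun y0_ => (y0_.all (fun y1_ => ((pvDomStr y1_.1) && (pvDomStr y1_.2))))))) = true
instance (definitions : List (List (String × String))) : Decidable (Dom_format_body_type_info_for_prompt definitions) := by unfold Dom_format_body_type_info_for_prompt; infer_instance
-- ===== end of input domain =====

-- B replaces A's single pass into one global parts list with a final '\n'.join by a
-- recursive decomposition: a pure per-definition block renderer plus structural recursion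
-- concatenating the blocks (objective: alternative).

-- ===== PORT A =====
-- shared lookup helper: Python's definition.get(key, '') / truthiness of definition.get(key)
def pvGet (d : List (String × String)) (k : String) : String :=
  (PySem.Dict.ofList d).getD k ""

-- loop body of A's 'for definition in definitions'
def pvStepA (parts : List String) (definition : List (String × String)) : List String :=
  let body_feature := pvGet definition "body_feature"
  let parts := if pvGet definition "strengths" ≠ "" then
      parts ++ ["**" ++ body_feature ++ "**: " ++ pvGet definition "strengths"] else parts
  let parts := if pvGet definition "style_tips" ≠ "" then
      parts ++ ["  - 스타일 팁: " ++ pvGet definition "style_tips"] else parts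
  let parts := if pvGet definition "recommended_dresses" ≠ "" then
      parts ++ ["  - 추천 드레스: " ++ pvGet definition "recommended_dresses"] else parts
  let parts := if pvGet definition "avoid_dresses" ≠ "" then
      parts ++ ["  - 피해야 할 드레스: " ++ pvGet definition "avoid_dresses"] else parts
  parts ++ [""]

def format_body_type_info_for_prompt (definitions : List (List (String × String))) : String :=
  if definitions.isEmpty then "" else
    let parts : List String := definitions.foldl pvStepA []
    if parts ≠ [] then "\n\n**체형별 정의 정보**:\n" ++ PySem.Str.join "\n" parts ++ "\n" else ""

-- ===== PORT B =====
def pvFields : List (String × String) :=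
  [("style_tips", "  - 스타일 팁: "),
   ("recommended_dresses", "  - 추천 드레스: "),
   ("avoid_dresses", "  - 피해야 할 드레스: ")]

-- B's _block: render one definition as a self-contained block ending in a blank line
def pvBlockB (definition : List (String × String)) : String :=
  let texts : List String :=
    (if pvGet definition "strengths" ≠ "" then
        ["**" ++ pvGet definition "body_feature" ++ "**: " ++ pvGet definition "strengths"]
      else []) ++
    pvFields.filterMap (fun kv =>
      if pvGet definition kv.1 ≠ "" then some (kv.2 ++ pvGet definition kv.1) else none)
  PySem.Str.join "" (texts.map (fun t => t ++ "\n")) ++ "\n"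

-- B's inner rec: structural recursion concatenating the blocks
def pvRecB : List (List (String × String)) → String
  | [] => ""
  | d :: ds => pvBlockB d ++ pvRecB ds

def format_body_type_info_for_prompt_alt (definitions : List (List (String × String))) : String :=
  if definitions.isEmpty then "" else
    "\n\n**체형별 정의 정보**:\n" ++ pvRecB definitions

-- ===== PRECONDITION & SPEC =====
def Spec_format_body_type_info_for_prompt (definitions : List (List (String × String))) (out : String) : Prop := out = format_body_type_info_for_prompt_alt definitions
instance (definitions : List (List (String × String))) (out : String) : Decidable (Spec_format_body_type_info_for_prompt definitions out) := by unfold Spec_format_body_type_info_for_prompt; infer_instance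

-- ===== CLAIM (what is proved, stated in full; the proofs are below) =====
def Claim_equal_format_body_type_info_for_prompt : Prop := ∀ (definitions : List (List (String × String))), Dom_format_body_type_info_for_prompt definitions → Spec_format_body_type_info_for_prompt definitions (format_body_type_info_for_prompt definitions)

-- ===== LEMMAS AND PROOFS =====

-- the lines A's iteration appends for one definition
def pvLinesA (definition : List (String × String)) : List String :=
  (if pvGet definition "strengths" ≠ "" then
      ["**" ++ pvGet definition "body_feature" ++ "**: " ++ pvGet definition "strengths"] else []) ++
  (if pvGet definition "style_tips" ≠ "" then
      ["  - 스타일 팁: " ++ pvGet definition "style_tips"] else []) ++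
  (if pvGet definition "recommended_dresses" ≠ "" then
      ["  - 추천 드레스: " ++ pvGet definition "recommended_dresses"] else []) ++
  (if pvGet definition "avoid_dresses" ≠ "" then
      ["  - 피해야 할 드레스: " ++ pvGet definition "avoid_dresses"] else []) ++
  [""]

lemma pvLinesA_ne (d : List (String × String)) : pvLinesA d ≠ [] := by
  unfold pvLinesA; split_ifs <;> simp

lemma pvStepA_eq (parts : List String) (d : List (String × String)) :
    pvStepA parts d = parts ++ pvLinesA d := by
  unfold pvStepA pvLinesA; split_ifs <;> simp

lemma pvFoldA (ds : List (List (String × String))) :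
    ∀ parts, ds.foldl pvStepA parts = parts ++ ds.flatMap pvLinesA := by
  induction ds with
  | nil => simp
  | cons d ds ih => intro parts; simp [List.foldl, pvStepA_eq, ih]

lemma pvJoin_append (sep : List Char) (xs ys : List (List Char)) (hx : xs ≠ []) (hy : ys ≠ []) :
    PySem.Chars.join sep (xs ++ ys) = PySem.Chars.join sep xs ++ sep ++ PySem.Chars.join sep ys := by
  induction xs with
  | nil => exact absurd rfl hx
  | cons x xs ih =>
      cases xs with
      | nil =>
          cases ys with
          | nil => exact absurd rfl hy
          | cons y ys => simp [PySem.Chars.join_cons_cons, PySem.Chars.join_singleton]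
      | cons x' xs' =>
          have h := ih (by simp)
          simp only [List.cons_append] at h ⊢
          rw [PySem.Chars.join_cons_cons, PySem.Chars.join_cons_cons, h]
          simp [List.append_assoc]

-- per-definition bridge: joining A's lines with '\n' plus the trailing '\n' is B's block
lemma pvBase (d : List (String × String)) :
    (PySem.Str.join "\n" (pvLinesA d)).toList ++ ['\n'] = (pvBlockB d).toList := by
  unfold pvBlockB pvFields pvLinesA
  split_ifs <;>
    simp_all [PySem.Str.toList_join, PySem.Chars.join_nil, PySem.Chars.join_cons_cons,
              PySem.Chars.join_singleton, List.filterMap]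

lemma pvMain (ds : List (List (String × String))) :
    ∀ d, (PySem.Str.join "\n" (pvLinesA d ++ ds.flatMap pvLinesA)).toList ++ ['\n'] =
      (pvBlockB d ++ pvRecB ds).toList := by
  induction ds with
  | nil => intro d; simpa [pvRecB] using pvBase d
  | cons d' ds ih =>
      intro d
      have hx : (pvLinesA d).map String.toList ≠ [] := by
        simp only [ne_eq, List.map_eq_nil_iff]; exact pvLinesA_ne d
      have hy : (pvLinesA d' ++ ds.flatMap pvLinesA).map String.toList ≠ [] := by
        simp only [ne_eq, List.map_eq_nil_iff, List.append_eq_nil_iff]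
        intro h; exact pvLinesA_ne d' h.1
      rw [PySem.Str.toList_join, List.flatMap_cons, ← List.append_assoc, List.append_assoc,
          List.map_append, pvJoin_append _ _ _ hx hy]
      have hB := pvBase d
      rw [PySem.Str.toList_join] at hB
      have hI := ih d'
      rw [PySem.Str.toList_join] at hI
      calc PySem.Chars.join "\n".toList ((pvLinesA d).map String.toList) ++ "\n".toList ++
            PySem.Chars.join "\n".toList ((pvLinesA d' ++ ds.flatMap pvLinesA).map String.toList) ++ ['\n']
          = (PySem.Chars.join "\n".toList ((pvLinesA d).map String.toList) ++ ['\n']) ++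
            (PySem.Chars.join "\n".toList ((pvLinesA d' ++ ds.flatMap pvLinesA).map String.toList) ++ ['\n']) := by
            simp [List.append_assoc]
        _ = (pvBlockB d).toList ++ ((pvBlockB d' ++ pvRecB ds).toList) := by
            rw [hB, hI]
        _ = _ := by simp [String.toList_append, pvRecB]

-- ===== VERDICT (by name: the statement is the Claim_ definition above) =====
theorem format_body_type_info_for_prompt_spec : Claim_equal_format_body_type_info_for_prompt := by
  intro definitions _
  unfold Spec_format_body_type_info_for_prompt format_body_type_info_for_prompt format_body_type_info_for_prompt_alt
  cases definitions with
  | nil => rfl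
  | cons d ds =>
      simp only [List.isEmpty_cons, if_neg (by simp : ¬ (false = true))]
      rw [pvFoldA]
      have hne : ([] : List String) ++ (d :: ds).flatMap pvLinesA ≠ [] := by
        simp [List.flatMap_cons, pvLinesA_ne d]
      rw [if_pos hne]
      apply String.toList_inj.mp
      have h := pvMain ds d
      simp only [String.toList_append, List.nil_append,
                 List.flatMap_cons, List.append_assoc]
      rw [show ("\n" : String).toList = ['\n'] from by simp] at *
      rw [show pvRecB (d :: ds) = pvBlockB d ++ pvRecB ds from rfl] at *
      rw [h]
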